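-- pv_equiv track=rewrite | github.com/zain08816/Coding-Problems | Set #1 Problems/Extra/alternatingSort.py | alternatingSort
-- ===== SOURCE A (Python) =====
-- from collections import deque
--
-- def alternatingSort(a):
--     a = deque(a)
--     b = []
--
--     for i in range(len(a)):
--         if i%2 == 0:
--             b.append(a.popleft())
--         else:
--             b.append(a.pop())
--
--     return all(i < j for i, j in zip(b, b[1:]))
-- ===== SOURCE B (Python) =====
-- def alternatingSort(a):
--     a = list(a)
--     n = len(a)
--     # Element picked at step i: a[i//2] from the front on even steps,
--     # a[n-1-i//2] from the back on odd steps -- computed by index, no deque.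
--     b = [a[i // 2] if i % 2 == 0 else a[n - 1 - i // 2] for i in range(n)]
--     return all(b[i] < b[i + 1] for i in range(n - 1))
-- ===== Notes on version B (the rewrite author's own statement) =====
-- stated objective: alternative
-- what changed: Replaces the mutating deque (popleft/pop per step) by a closed-form index: the i-th picked element is a[i//2] for even i and a[n-1-i//2] for odd i, built with one comprehension and checked by adjacent-index comparison.
import Mathlib
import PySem

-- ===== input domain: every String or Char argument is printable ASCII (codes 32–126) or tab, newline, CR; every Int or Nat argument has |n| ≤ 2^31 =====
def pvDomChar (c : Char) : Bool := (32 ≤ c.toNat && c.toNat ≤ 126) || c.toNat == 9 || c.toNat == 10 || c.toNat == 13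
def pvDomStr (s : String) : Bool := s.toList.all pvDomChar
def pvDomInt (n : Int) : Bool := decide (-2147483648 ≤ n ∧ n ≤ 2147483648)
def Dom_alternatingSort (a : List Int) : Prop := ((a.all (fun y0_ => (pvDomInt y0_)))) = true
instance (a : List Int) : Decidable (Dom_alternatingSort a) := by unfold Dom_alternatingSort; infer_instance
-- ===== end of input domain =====

-- B replaces A's mutating deque by a closed-form index per step (alternative decomposition, same O(n) cost).

-- ===== PORT A =====
-- the loop body: even step pops from the left of the deque, odd step from the right
def pvStepA (st : List Int × List Int) (i : Nat) : List Int × List Int :=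
  if i % 2 == 0 then (st.1.tail, st.2 ++ [st.1.headD 0])
  else (st.1.dropLast, st.2 ++ [st.1.getLastD 0])

def alternatingSort (a : List Int) : Bool :=
  let st := (List.range a.length).foldl pvStepA (a, [])
  (st.2.zip st.2.tail).all (fun p => decide (p.1 < p.2))

-- ===== PORT B =====
def alternatingSort_alt (a : List Int) : Bool :=
  let n := a.length
  let b := (List.range n).map (fun i =>
    if i % 2 == 0 then a.getD (i / 2) 0 else a.getD (n - 1 - i / 2) 0)
  (List.range (n - 1)).all (fun i => decide (b.getD i 0 < b.getD (i + 1) 0))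

-- ===== PRECONDITION & SPEC =====
def Spec_alternatingSort (a : List Int) (out : Bool) : Prop := out = alternatingSort_alt a
instance (a : List Int) (out : Bool) : Decidable (Spec_alternatingSort a out) := by unfold Spec_alternatingSort; infer_instance

-- ===== CLAIM (what is proved, stated in full; the proofs are below) =====
def Claim_equal_alternatingSort : Prop := ∀ (a : List Int), Dom_alternatingSort a → Spec_alternatingSort a (alternatingSort a)

-- ===== LEMMAS AND PROOFS =====

theorem tail_take' (l : List Int) (m : Nat) : (l.take m).tail = l.tail.take (m-1) := by
  induction l <;> cases m <;> simp_all

-- loop invariant: after k steps the deque is the middle slice and b is the picked prefix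
theorem pvLoopInv (a : List Int) (k : Nat) (hk : k ≤ a.length) :
    (List.range k).foldl pvStepA (a, []) =
      ((a.drop ((k + 1) / 2)).take (a.length - k), (List.range k).map (fun i =>
        if i % 2 == 0 then a.getD (i / 2) 0 else a.getD (a.length - 1 - i / 2) 0)) := by
  induction k with
  | zero => simp
  | succ k ih =>
    have hk' : k ≤ a.length := by omega
    rw [List.range_succ, List.foldl_append, List.map_append, ih hk']
    set d := (a.drop ((k + 1) / 2)).take (a.length - k) with hd
    have hdlen : d.length = a.length - k := by
      rw [hd]; simp; omega
    have hget : ∀ i, i < a.length - k → d[i]? = a[(k+1)/2 + i]? := by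
      intro i hi
      rw [hd, List.getElem?_take_of_lt hi, List.getElem?_drop]
    simp only [List.foldl_cons, List.foldl_nil, pvStepA]
    rcases Nat.even_or_odd k with he | ho
    · -- k even
      obtain ⟨t, rfl⟩ := he
      have h2 : ((t + t) % 2 == 0) = true := by simp; omega
      rw [if_pos h2]
      simp only [Prod.mk.injEq]
      refine ⟨?_, ?_⟩
      · rw [hd, tail_take', List.tail_drop,
          show (t+t+1+1)/2 = (t+t+1)/2 + 1 from by omega,
          show a.length - (t+t+1) = a.length - (t+t) - 1 from by omega]
      · congr 1
        have hh : d.headD 0 = (d[0]?).getD 0 := by cases d <;> simp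
        rw [hh, hget 0 (by omega)]
        simp only [List.map_cons, List.map_nil, h2, if_true, List.getD_eq_getElem?_getD]
        rw [show (t+t+1)/2 + 0 = (t+t)/2 from by omega]
    · -- k odd
      obtain ⟨t, rfl⟩ := ho
      have h2 : ((2 * t + 1) % 2 == 0) = false := by simp
      rw [if_neg (by simp)]
      simp only [Prod.mk.injEq]
      refine ⟨?_, ?_⟩
      · rw [List.dropLast_eq_take, hdlen, hd, List.take_take,
          show (2*t+1+1+1)/2 = (2*t+1+1)/2 from by omega,
          show min (a.length - (2*t+1) - 1) (a.length - (2*t+1)) = a.length - (2*t+1+1) from by omega]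
      · congr 1
        have hl : d.getLastD 0 = (d[d.length - 1]?).getD 0 := by
          simp [List.getLastD_eq_getLast?, List.getLast?_eq_getElem?]
        rw [hl, hdlen, hget (a.length - (2*t+1) - 1) (by omega)]
        simp only [List.getD_eq_getElem?_getD]
        rw [show (2*t+1+1)/2 + (a.length - (2*t+1) - 1) = a.length - 1 - (2*t+1)/2 from by omega]
        simp only [List.map_cons, List.map_nil, h2, Bool.false_eq_true, if_false]

theorem pvAllZip (b : List Int) :
    (b.zip b.tail).all (fun p => decide (p.1 < p.2)) =
      (List.range (b.length - 1)).all (fun i => decide (b.getD i 0 < b.getD (i + 1) 0)) := by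
  induction b with
  | nil => rfl
  | cons x t ih =>
    cases t with
    | nil => rfl
    | cons y u =>
      have h : (x :: y :: u).length - 1 = ((y :: u).length - 1) + 1 := by simp
      rw [h, List.range_succ_eq_map]
      simp only [List.getD_cons_succ] at ih
      simp only [List.all_cons, List.all_map, Function.comp_def,
        List.getD_cons_succ, List.getD_cons_zero, Nat.succ_eq_add_one]
      rw [← ih]
      rfl

-- ===== VERDICT (by name: the statement is the Claim_ definition above) =====
theorem alternatingSort_spec : Claim_equal_alternatingSort := by
  intro a _
  unfold Spec_alternatingSort alternatingSort alternatingSort_alt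
  rw [pvLoopInv a a.length le_rfl, pvAllZip]
  simp
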